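-- pv_equiv track=rewrite | github.com/SergeiGendlyar/TCMC | task1.py | format_chain_fraction
-- ===== SOURCE A (Python) =====
-- def build_fraction_chain(steps):
--     """
--     Строит представление цепной дроби в виде вложенных дробей.
--     """
--     fractions = []
--     for i in reversed(range(len(steps))):
--         q = steps[i][2]
--         if i == len(steps) - 1:
--             fractions.append(f"{q}")
--         else:
--             fractions.append(f"{q} + \\frac{{1}}{{{fractions.pop()}}}")
--     return fractions[0]
--
-- def format_chain_fraction(a, b, steps):
--     """
--     Формирует текст с вычислениями цепной дроби, включая разложения дробей.
--     """
--     markdown_text = f"<h3 style=\"text-align: center;\">Решение</h3>\n\nРассмотрим рациональное число $r = \\frac{{{a}}}{{{b}}}$.\n\n"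
--     markdown_text += "Для представления числа в виде цепной дроби используем алгоритм Евклида:\n\n"
--     arr_qi = []
--     for i, (a_i, b_i, q_i, r_i) in enumerate(steps):
--         arr_qi.append(f"q_{{{i + 1}}}")
--         # Основной шаг
--         markdown_text += (
--             f"$$a_{{{i}}} = {a_i}, \\quad b_{{{i}}} = {b_i}, \\quad "
--             f"q_{{{i + 1}}} = {q_i}, \\quad r_{{{i + 1}}} = {r_i}$$\n\n"
--         )
--         markdown_text += (
--             f"$$a_{{{i}}} = b_{{{i}}} \\cdot q_{{{i + 1}}} + r_{{{i + 1}}} \\quad \\Rightarrow \\quad "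
--             f"{a_i} = {b_i} \\cdot {q_i} + {r_i}$$\n\n"
--         )
--
--         # Дополнительное разложение дробей
--         if b_i != 0:
--             markdown_text += (
--                 f"$$\\frac{{a_{{{i}}}}}{{b_{{{i}}}}} = \\frac{{{a_i}}}{{{b_i}}} = "
--                 f"{q_i} + \\frac{{{r_i}}}{{{b_i}}}$$\n\n"
--             )
--
--     chain = "; ".join(map(str, [step[2] for step in steps]))
--     q_chain = "; ".join(map(str, arr_qi))
--     markdown_text += f"Следовательно, рациональное число $r = \\frac{{{a}}}{{{b}}}$ можно записать в виде цепной дроби: $[{q_chain}]$ = $[{chain}]$.\n\n"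
--
--     # Формирование вложенной дроби
--     fraction_repr = build_fraction_chain(steps)
--     markdown_text += f"Таким образом:\n\n"
--     markdown_text += f"$$r = {fraction_repr}$$\n\n"
--
--     return markdown_text
-- ===== SOURCE B (Python) =====
-- def format_chain_fraction(a, b, steps):
--     """
--     Same Markdown, built declaratively: per-step blocks produced by a pure
--     helper and joined, q-labels from a range, and the nested fraction by
--     direct recursion on the list of quotients (no stack).
--     """
--     def block(i, step):
--         a_i, b_i, q_i, r_i = step
--         parts = [
--             f"$$a_{{{i}}} = {a_i}, \\quad b_{{{i}}} = {b_i}, \\quad "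
--             f"q_{{{i + 1}}} = {q_i}, \\quad r_{{{i + 1}}} = {r_i}$$\n\n",
--             f"$$a_{{{i}}} = b_{{{i}}} \\cdot q_{{{i + 1}}} + r_{{{i + 1}}} \\quad \\Rightarrow \\quad "
--             f"{a_i} = {b_i} \\cdot {q_i} + {r_i}$$\n\n",
--         ]
--         if b_i != 0:
--             parts.append(
--                 f"$$\\frac{{a_{{{i}}}}}{{b_{{{i}}}}} = \\frac{{{a_i}}}{{{b_i}}} = "
--                 f"{q_i} + \\frac{{{r_i}}}{{{b_i}}}$$\n\n"
--             )
--         return "".join(parts)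
--
--     def nest(rest):
--         head = rest[0]
--         if len(rest) == 1:
--             return str(head)
--         return f"{head} + \\frac{{1}}{{{nest(rest[1:])}}}"
--
--     qs = [step[2] for step in steps]
--     header = (
--         f"<h3 style=\"text-align: center;\">Решение</h3>\n\n"
--         f"Рассмотрим рациональное число $r = \\frac{{{a}}}{{{b}}}$.\n\n"
--         "Для представления числа в виде цепной дроби используем алгоритм Евклида:\n\n"
--     )
--     body = "".join([block(i, step) for i, step in enumerate(steps)])
--     q_chain = "; ".join([f"q_{{{i + 1}}}" for i in range(len(steps))])
--     chain = "; ".join([str(q) for q in qs])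
--     tail = (
--         f"Следовательно, рациональное число $r = \\frac{{{a}}}{{{b}}}$ можно записать "
--         f"в виде цепной дроби: $[{q_chain}]$ = $[{chain}]$.\n\n"
--         f"Таким образом:\n\n$$r = {nest(qs)}$$\n\n"
--     )
--     return header + body + tail
-- ===== Notes on version B (the rewrite author's own statement) =====
-- stated objective: simpler
-- what changed: Replaces the single mutating accumulator loop and the explicit stack (append/pop over reversed indices) with a declarative build: per-step blocks from a pure helper joined together, q-labels generated from a range, and the nested fraction by direct recursion on the list of quotients.
import Mathlib
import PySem

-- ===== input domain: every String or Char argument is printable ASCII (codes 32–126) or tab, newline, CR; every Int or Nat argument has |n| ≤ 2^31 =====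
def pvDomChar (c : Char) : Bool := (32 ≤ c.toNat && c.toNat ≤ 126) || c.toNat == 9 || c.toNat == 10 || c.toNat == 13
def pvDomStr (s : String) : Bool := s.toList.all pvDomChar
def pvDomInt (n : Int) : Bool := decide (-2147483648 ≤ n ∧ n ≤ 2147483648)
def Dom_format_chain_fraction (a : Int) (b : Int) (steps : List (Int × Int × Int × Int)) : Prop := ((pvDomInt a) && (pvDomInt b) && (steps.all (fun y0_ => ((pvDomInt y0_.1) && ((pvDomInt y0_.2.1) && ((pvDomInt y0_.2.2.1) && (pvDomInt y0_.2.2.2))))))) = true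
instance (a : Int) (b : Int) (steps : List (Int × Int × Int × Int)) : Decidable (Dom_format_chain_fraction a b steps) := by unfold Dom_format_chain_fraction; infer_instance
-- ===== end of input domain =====

-- B replaces A's mutating accumulator loop and explicit stack with a declarative build
-- (joined per-step blocks, labels from a range, direct recursion for the nested fraction); same output.

-- ===== PORT A =====
-- body of A's main for-loop: one enumerated step updates (markdown_text, arr_qi)
def pvStepA (st : String × List String) (p : Int × (Int × Int × Int × Int)) : String × List String :=
  let i := p.1
  let a_i := p.2.1
  let b_i := p.2.2.1
  let q_i := p.2.2.2.1
  let r_i := p.2.2.2.2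
  let arr_qi := st.2 ++ ["q_{" ++ PySem.Int.toStr (i + 1) ++ "}"]
  let md := st.1 ++ ("$$a_{" ++ PySem.Int.toStr i ++ "} = " ++ PySem.Int.toStr a_i ++ ", \\quad b_{" ++ PySem.Int.toStr i ++ "} = " ++ PySem.Int.toStr b_i ++ ", \\quad q_{" ++ PySem.Int.toStr (i + 1) ++ "} = " ++ PySem.Int.toStr q_i ++ ", \\quad r_{" ++ PySem.Int.toStr (i + 1) ++ "} = " ++ PySem.Int.toStr r_i ++ "$$\n\n")
  let md := md ++ ("$$a_{" ++ PySem.Int.toStr i ++ "} = b_{" ++ PySem.Int.toStr i ++ "} \\cdot q_{" ++ PySem.Int.toStr (i + 1) ++ "} + r_{" ++ PySem.Int.toStr (i + 1) ++ "} \\quad \\Rightarrow \\quad " ++ PySem.Int.toStr a_i ++ " = " ++ PySem.Int.toStr b_i ++ " \\cdot " ++ PySem.Int.toStr q_i ++ " + " ++ PySem.Int.toStr r_i ++ "$$\n\n")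
  let md := if b_i ≠ 0 then md ++ ("$$\\frac{a_{" ++ PySem.Int.toStr i ++ "}}{b_{" ++ PySem.Int.toStr i ++ "}} = \\frac{" ++ PySem.Int.toStr a_i ++ "}{" ++ PySem.Int.toStr b_i ++ "} = " ++ PySem.Int.toStr q_i ++ " + \\frac{" ++ PySem.Int.toStr r_i ++ "}{" ++ PySem.Int.toStr b_i ++ "}$$\n\n") else md
  (md, arr_qi)

-- body of build_fraction_chain's loop over i ∈ reversed(range(len(steps)))
def pvStackA (steps : List (Int × Int × Int × Int)) (fractions : List String) (i : Int) : List String :=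
  let q := (PySem.List.pyGetD steps i (0, 0, 0, 0)).2.2.1   -- steps[i]; i is always a valid index here
  if i = (steps.length : Int) - 1 then
    fractions ++ [PySem.Int.toStr q]
  else
    match PySem.List.pop? fractions with
    | some (top, rest) => rest ++ [PySem.Int.toStr q ++ " + \\frac{1}{" ++ top ++ "}"]
    | none => fractions   -- fractions.pop() on an empty stack: never reached (the stack holds one element)

def build_fraction_chain (steps : List (Int × Int × Int × Int)) : String :=
  let fractions := ((PySem.List.pyRange 0 (steps.length : Int) 1).reverse).foldl (pvStackA steps) []
  fractions.headD ""   -- fractions[0]: IndexError exactly when steps = [] (excluded by Pre_)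

def format_chain_fraction (a : Int) (b : Int) (steps : List (Int × Int × Int × Int)) : String :=
  let markdown_text := "<h3 style=\"text-align: center;\">Решение</h3>\n\nРассмотрим рациональное число $r = \\frac{" ++ PySem.Int.toStr a ++ "}{" ++ PySem.Int.toStr b ++ "}$.\n\n"
  let markdown_text := markdown_text ++ "Для представления числа в виде цепной дроби используем алгоритм Евклида:\n\n"
  let st := (PySem.List.enumerate steps).foldl pvStepA (markdown_text, [])
  let chain := PySem.Str.join "; " ((steps.map (fun step => step.2.2.1)).map PySem.Int.toStr)
  let q_chain := PySem.Str.join "; " st.2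
  let md := st.1 ++ ("Следовательно, рациональное число $r = \\frac{" ++ PySem.Int.toStr a ++ "}{" ++ PySem.Int.toStr b ++ "}$ можно записать в виде цепной дроби: $[" ++ q_chain ++ "]$ = $[" ++ chain ++ "]$.\n\n")
  let fraction_repr := build_fraction_chain steps
  let md := md ++ "Таким образом:\n\n"
  md ++ ("$$r = " ++ fraction_repr ++ "$$\n\n")

-- ===== PORT B =====
-- B's pure per-step block (the three LaTeX lines, the third only when b_i ≠ 0)
def pvBlock (i : Int) (step : Int × Int × Int × Int) : String :=
  let a_i := step.1
  let b_i := step.2.1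
  let q_i := step.2.2.1
  let r_i := step.2.2.2
  let parts := ["$$a_{" ++ PySem.Int.toStr i ++ "} = " ++ PySem.Int.toStr a_i ++ ", \\quad b_{" ++ PySem.Int.toStr i ++ "} = " ++ PySem.Int.toStr b_i ++ ", \\quad q_{" ++ PySem.Int.toStr (i + 1) ++ "} = " ++ PySem.Int.toStr q_i ++ ", \\quad r_{" ++ PySem.Int.toStr (i + 1) ++ "} = " ++ PySem.Int.toStr r_i ++ "$$\n\n",
               "$$a_{" ++ PySem.Int.toStr i ++ "} = b_{" ++ PySem.Int.toStr i ++ "} \\cdot q_{" ++ PySem.Int.toStr (i + 1) ++ "} + r_{" ++ PySem.Int.toStr (i + 1) ++ "} \\quad \\Rightarrow \\quad " ++ PySem.Int.toStr a_i ++ " = " ++ PySem.Int.toStr b_i ++ " \\cdot " ++ PySem.Int.toStr q_i ++ " + " ++ PySem.Int.toStr r_i ++ "$$\n\n"]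
  let parts := if b_i ≠ 0 then parts ++ ["$$\\frac{a_{" ++ PySem.Int.toStr i ++ "}}{b_{" ++ PySem.Int.toStr i ++ "}} = \\frac{" ++ PySem.Int.toStr a_i ++ "}{" ++ PySem.Int.toStr b_i ++ "} = " ++ PySem.Int.toStr q_i ++ " + \\frac{" ++ PySem.Int.toStr r_i ++ "}{" ++ PySem.Int.toStr b_i ++ "}$$\n\n"] else parts
  PySem.Str.join "" parts

-- B's nest: direct recursion on the list of quotients (rest[0] on [] raises; unreachable under Pre_)
def pvNest : List Int → String
  | [] => ""
  | [q] => PySem.Int.toStr q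
  | q :: r :: rest => PySem.Int.toStr q ++ " + \\frac{1}{" ++ pvNest (r :: rest) ++ "}"

def format_chain_fraction_alt (a : Int) (b : Int) (steps : List (Int × Int × Int × Int)) : String :=
  let qs := steps.map (fun step => step.2.2.1)
  let header := "<h3 style=\"text-align: center;\">Решение</h3>\n\nРассмотрим рациональное число $r = \\frac{" ++ PySem.Int.toStr a ++ "}{" ++ PySem.Int.toStr b ++ "}$.\n\nДля представления числа в виде цепной дроби используем алгоритм Евклида:\n\n"
  let body := PySem.Str.join "" ((PySem.List.enumerate steps).map (fun p => pvBlock p.1 p.2))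
  let q_chain := PySem.Str.join "; " ((PySem.List.pyRange 0 (steps.length : Int) 1).map (fun i => "q_{" ++ PySem.Int.toStr (i + 1) ++ "}"))
  let chain := PySem.Str.join "; " (qs.map PySem.Int.toStr)
  let tail := "Следовательно, рациональное число $r = \\frac{" ++ PySem.Int.toStr a ++ "}{" ++ PySem.Int.toStr b ++ "}$ можно записать в виде цепной дроби: $[" ++ q_chain ++ "]$ = $[" ++ chain ++ "]$.\n\nТаким образом:\n\n$$r = " ++ pvNest qs ++ "$$\n\n"
  header ++ body ++ tail

-- ===== PRECONDITION & SPEC =====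
-- Pre_ excludes exactly steps = [], on which A raises IndexError (fractions[0] of an empty stack).
def Pre_format_chain_fraction (a : Int) (b : Int) (steps : List (Int × Int × Int × Int)) : Prop := steps ≠ []
instance (a : Int) (b : Int) (steps : List (Int × Int × Int × Int)) : Decidable (Pre_format_chain_fraction a b steps) := by unfold Pre_format_chain_fraction; infer_instance
def pvWitness_format_chain_fraction : Int × Int × (List (Int × Int × Int × Int)) := (7, 3, [(7, 3, 2, 1), (3, 1, 3, 0)])
def Spec_format_chain_fraction (a : Int) (b : Int) (steps : List (Int × Int × Int × Int)) (out : String) : Prop := out = format_chain_fraction_alt a b steps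
instance (a : Int) (b : Int) (steps : List (Int × Int × Int × Int)) (out : String) : Decidable (Spec_format_chain_fraction a b steps out) := by unfold Spec_format_chain_fraction; infer_instance

-- ===== CLAIM (what is proved, stated in full; the proofs are below) =====
def Claim_equal_format_chain_fraction : Prop := ∀ (a : Int) (b : Int) (steps : List (Int × Int × Int × Int)), Dom_format_chain_fraction a b steps → Pre_format_chain_fraction a b steps → Spec_format_chain_fraction a b steps (format_chain_fraction a b steps)

-- ===== LEMMAS AND PROOFS =====

theorem pv_join_empty_nil : PySem.Str.join "" ([] : List String) = "" := by
  apply String.toList_inj.mp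
  simp [PySem.Chars.join_nil]

theorem pv_join_empty_cons (x : String) (xs : List String) :
    PySem.Str.join "" (x :: xs) = x ++ PySem.Str.join "" xs := by
  apply String.toList_inj.mp
  cases xs with
  | nil => simp [PySem.Chars.join_singleton, PySem.Chars.join_nil]
  | cons y ys => simp [PySem.Chars.join_cons_cons]

theorem pv_stepA_eq (st : String × List String) (p : Int × (Int × Int × Int × Int)) :
    pvStepA st p = (st.1 ++ pvBlock p.1 p.2, st.2 ++ ["q_{" ++ PySem.Int.toStr (p.1 + 1) ++ "}"]) := by
  obtain ⟨i, a_i, b_i, q_i, r_i⟩ := p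
  by_cases h : b_i = 0 <;>
    simp [pvStepA, pvBlock, h, pv_join_empty_cons, pv_join_empty_nil, String.append_assoc]

theorem pv_foldA (l : List (Int × Int × Int × Int)) :
    ∀ (s : Int) (t : String) (arr : List String),
    (PySem.List.enumerate l s).foldl pvStepA (t, arr) =
      (t ++ PySem.Str.join "" ((PySem.List.enumerate l s).map (fun p => pvBlock p.1 p.2)),
       arr ++ (PySem.List.enumerate l s).map (fun p => "q_{" ++ PySem.Int.toStr (p.1 + 1) ++ "}")) := by
  induction l with
  | nil => intro s t arr; simp [PySem.List.enumerate_nil, pv_join_empty_nil]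
  | cons x xs ih =>
      intro s t arr
      rw [PySem.List.enumerate_cons]
      simp only [List.foldl_cons, List.map_cons, pv_stepA_eq, ih, pv_join_empty_cons]
      simp [String.append_assoc]

theorem pv_labels_eq (steps : List (Int × Int × Int × Int)) :
    (PySem.List.enumerate steps).map (fun p => "q_{" ++ PySem.Int.toStr (p.1 + 1) ++ "}") =
      (PySem.List.pyRange 0 (steps.length : Int) 1).map (fun i => "q_{" ++ PySem.Int.toStr (i + 1) ++ "}") := by
  have h := PySem.List.map_fst_enumerate steps 0
  calc (PySem.List.enumerate steps).map (fun p => "q_{" ++ PySem.Int.toStr (p.1 + 1) ++ "}")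
      = ((PySem.List.enumerate steps).map (fun p => p.1)).map (fun i => "q_{" ++ PySem.Int.toStr (i + 1) ++ "}") := by
        rw [List.map_map]; rfl
    _ = _ := by rw [h]; norm_num

theorem pv_stackA_inv (steps : List (Int × Int × Int × Int)) (k : ℕ) :
    ∀ j : ℕ, j + (k + 1) = steps.length →
    ((PySem.List.pyRange (j : Int) (steps.length : Int) 1).reverse).foldl (pvStackA steps) [] =
      [pvNest ((steps.map (fun s => s.2.2.1)).drop j)] := by
  induction k with
  | zero =>
      intro j hj
      have hjl : j < steps.length := by omega
      have hlt : (j : Int) < (steps.length : Int) := by exact_mod_cast hjl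
      rw [PySem.List.pyRange_one_cons hlt, PySem.List.pyRange_one_eq_nil (by omega)]
      have hq : (PySem.List.pyGetD steps (j : Int) (0, 0, 0, 0)) = steps[j] := by
        rw [PySem.List.pyGetD_natCast]; exact List.getD_eq_getElem _ _ hjl
      have hdrop : (steps.map (fun s => s.2.2.1)).drop j = [steps[j].2.2.1] := by
        have h2 : (steps.map (fun s => s.2.2.1)).length ≤ j + 1 := by
          simpa using (by omega : steps.length ≤ j + 1)
        rw [List.drop_eq_getElem_cons (by simpa using hjl), List.drop_eq_nil_of_le h2]
        simp
      have hcond : (j : Int) = (steps.length : Int) - 1 := by omega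
      have hq' : PySem.List.pyGetD steps ((steps.length : Int) - 1) (0, 0, 0, 0) = steps[j] := by
        rw [← hcond]; exact hq
      rw [hdrop]
      simp [pvStackA, hcond, hq', pvNest]
  | succ k ih =>
      intro j hj
      have hjl : j < steps.length := by omega
      have hlt : (j : Int) < (steps.length : Int) := by exact_mod_cast hjl
      rw [PySem.List.pyRange_one_cons hlt, List.reverse_cons, List.foldl_append]
      have hih := ih (j + 1) (by omega)
      push_cast at hih
      rw [hih]
      have hne : ¬ ((j : Int) = (steps.length : Int) - 1) := by omega
      have hq : (PySem.List.pyGetD steps (j : Int) (0, 0, 0, 0)) = steps[j] := by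
        rw [PySem.List.pyGetD_natCast]; exact List.getD_eq_getElem _ _ hjl
      have hj1 : j + 1 < steps.length := by omega
      have hdrop : (steps.map (fun s => s.2.2.1)).drop j
          = steps[j].2.2.1 :: steps[j + 1].2.2.1 :: (steps.map (fun s => s.2.2.1)).drop (j + 2) := by
        rw [List.drop_eq_getElem_cons (by simpa using hjl),
            List.drop_eq_getElem_cons (by simpa using hj1)]
        simp
      rw [hdrop]
      have hpop : ∀ x : String, PySem.List.pop? [x] = some (x, []) := fun x => by
        simpa using PySem.List.pop?_last ([] : List String) x
      have hdrop1 : (steps.map (fun s => s.2.2.1)).drop (j + 1)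
          = steps[j + 1].2.2.1 :: (steps.map (fun s => s.2.2.1)).drop (j + 2) := by
        rw [List.drop_eq_getElem_cons (by simpa using hj1)]
        simp
      simp [pvStackA, hq, hne, hpop, hdrop1, pvNest]

theorem pv_build_eq (steps : List (Int × Int × Int × Int)) (h : steps ≠ []) :
    build_fraction_chain steps = pvNest (steps.map (fun s => s.2.2.1)) := by
  have hlen : 0 < steps.length := List.length_pos_of_ne_nil h
  have hinv := pv_stackA_inv steps (steps.length - 1) 0 (by omega)
  push_cast at hinv
  unfold build_fraction_chain
  rw [hinv]
  simp

-- glue for the two places where B's one literal equals two adjacent literals of A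
set_option maxRecDepth 8192 in
theorem pv_lit_header : ("}$.\n\nДля представления числа в виде цепной дроби используем алгоритм Евклида:\n\n" : String)
    = "}$.\n\n" ++ "Для представления числа в виде цепной дроби используем алгоритм Евклида:\n\n" := by decide

set_option maxRecDepth 8192 in
theorem pv_lit_tail : ("]$.\n\nТаким образом:\n\n$$r = " : String)
    = "]$.\n\n" ++ ("Таким образом:\n\n" ++ "$$r = ") := by decide

-- ===== VERDICT (by name: the statement is the Claim_ definition above) =====
theorem format_chain_fraction_spec : Claim_equal_format_chain_fraction := by
  intro a b steps _ hpre
  unfold Spec_format_chain_fraction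
  simp only [format_chain_fraction, format_chain_fraction_alt, pv_foldA, pv_build_eq steps hpre,
    List.nil_append, pv_labels_eq]
  simp only [pv_lit_header, pv_lit_tail, String.append_assoc]
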